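-- pv_equiv track=rewrite | github.com/zed0/advent-of-code | 2024/src/aoc-05/main.py | find_invalid_index
-- ===== SOURCE A (Python) =====
-- def find_invalid_index(update_nums, ordermap):
--     forbidden = set()
--     for idx, page in enumerate(update_nums):
--         if page in forbidden:
--             return idx
--         if page in ordermap:
--             forbidden = forbidden.union(ordermap[page])
--     return None
-- ===== SOURCE B (Python) =====
-- def find_invalid_index(update_nums, ordermap):
--     # pass 1: for each page, the earliest index from which it is forbidden
--     n = len(update_nums)
--     earliest_ban = {}
--     for j, page in enumerate(update_nums):
--         for succ in ordermap.get(page, ()):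
--             if succ not in earliest_ban:
--                 earliest_ban[succ] = j + 1
--     # pass 2: first index already past its page's ban point
--     for idx, page in enumerate(update_nums):
--         if earliest_ban.get(page, n + 1) <= idx:
--             return idx
--     return None
-- ===== Notes on version B (the rewrite author's own statement) =====
-- stated objective: alternative
-- what changed: Replaces A's growing forbidden set (rebuilt by set.union at each step) with two passes: one pass builds a dict mapping each page to the earliest index from which it is forbidden, a second pass returns the first index at or past its page's ban point.
import Mathlib
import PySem

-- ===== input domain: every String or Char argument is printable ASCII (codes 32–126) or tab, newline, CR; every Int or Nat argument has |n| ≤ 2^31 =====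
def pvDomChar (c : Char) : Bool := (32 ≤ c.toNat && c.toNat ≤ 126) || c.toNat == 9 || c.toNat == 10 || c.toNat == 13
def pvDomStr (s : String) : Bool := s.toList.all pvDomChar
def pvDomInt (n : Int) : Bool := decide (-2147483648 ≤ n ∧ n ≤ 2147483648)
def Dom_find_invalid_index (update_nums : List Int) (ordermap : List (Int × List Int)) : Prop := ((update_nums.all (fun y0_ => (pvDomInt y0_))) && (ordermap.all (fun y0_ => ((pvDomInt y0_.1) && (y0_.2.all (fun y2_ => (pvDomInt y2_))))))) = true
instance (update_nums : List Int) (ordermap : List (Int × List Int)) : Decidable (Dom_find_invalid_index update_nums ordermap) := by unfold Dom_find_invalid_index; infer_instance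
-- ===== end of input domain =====

-- B replaces A's growing forbidden set by two passes: a dict mapping each page to the
-- earliest index from which it is forbidden, then the first index at or past its ban point.

-- ===== PORT A =====
-- the for-loop of A: state = (remaining pages, current index, forbidden set)
def pvA_loop (ordermap : List (Int × List Int)) : List Int → Int → PySem.Set Int → Option Int
  | [], _, _ => none
  | page :: rest, idx, forbidden =>
    if PySem.Set.contains forbidden page then some idx
    else if PySem.Dict.contains ⟨ordermap⟩ page then
      pvA_loop ordermap rest (idx + 1)
        (PySem.Set.union forbidden (PySem.Dict.getD ⟨ordermap⟩ page []))
    else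
      pvA_loop ordermap rest (idx + 1) forbidden

def find_invalid_index (update_nums : List Int) (ordermap : List (Int × List Int)) : Option Int :=
  pvA_loop ordermap update_nums 0 PySem.Set.empty

-- ===== PORT B =====
-- pass 1 of B: the dict `earliest_ban` (local variable of Source B, extracted as a helper)
def pvEarliestBan (update_nums : List Int) (ordermap : List (Int × List Int)) :
    PySem.Dict Int Int :=
  (PySem.List.enumerate update_nums).foldl
    (fun d jp =>
      (PySem.Dict.getD ⟨ordermap⟩ jp.2 []).foldl
        (fun d succ => if d.contains succ then d else d.insert succ (jp.1 + 1)) d)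
    PySem.Dict.empty

-- pass 2 of B: first index at or past its page's ban point
def find_invalid_index_alt (update_nums : List Int) (ordermap : List (Int × List Int)) : Option Int :=
  ((PySem.List.enumerate update_nums).find? (fun ip =>
      decide ((pvEarliestBan update_nums ordermap).getD ip.2 ((update_nums.length : Int) + 1)
        ≤ ip.1))).map (·.1)

-- ===== PRECONDITION & SPEC =====
def Spec_find_invalid_index (update_nums : List Int) (ordermap : List (Int × List Int)) (out : Option Int) : Prop := out = find_invalid_index_alt update_nums ordermap
instance (update_nums : List Int) (ordermap : List (Int × List Int)) (out : Option Int) : Decidable (Spec_find_invalid_index update_nums ordermap out) := by unfold Spec_find_invalid_index; infer_instance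

-- ===== CLAIM (what is proved, stated in full; the proofs are below) =====
def Claim_equal_find_invalid_index : Prop := ∀ (update_nums : List Int) (ordermap : List (Int × List Int)), Dom_find_invalid_index update_nums ordermap → Spec_find_invalid_index update_nums ordermap (find_invalid_index update_nums ordermap)

-- ===== LEMMAS AND PROOFS =====

-- the predicate A effectively evaluates at index ip.1 (prefix scan form)
def pvP (ordermap : List (Int × List Int)) (full : List Int) (ip : Int × Int) : Bool :=
  (PySem.List.slice full none (some ip.1)).any
    (fun prev => (PySem.Dict.getD ⟨ordermap⟩ prev []).contains ip.2)

-- membership of a union, as a Bool equation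
theorem pv_contains_union (s : PySem.Set Int) (t : List Int) (p : Int) :
    PySem.Set.contains (PySem.Set.union s t) p = (PySem.Set.contains s p || t.contains p) := by
  simp [PySem.Set.mem_union]

-- the pages forbidden after processing the prefix `pre`
def pvBad (ordermap : List (Int × List Int)) (pre : List Int) (p : Int) : Bool :=
  pre.any (fun prev => (PySem.Dict.getD ⟨ordermap⟩ prev []).contains p)

theorem pvBad_append (ordermap : List (Int × List Int)) (pre : List Int) (q p : Int) :
    pvBad ordermap (pre ++ [q]) p
      = (pvBad ordermap pre p || (PySem.Dict.getD ⟨ordermap⟩ q []).contains p) := by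
  simp [pvBad]

-- A-side invariant: if `forbidden` is exactly the set of pages forbidden by the prefix `pre`,
-- A's loop on the suffix equals a find? of the prefix-scan predicate over the suffix
theorem pvA_loop_eq (ordermap : List (Int × List Int)) :
    ∀ (rest pre : List Int) (forbidden : PySem.Set Int),
      (∀ p : Int, PySem.Set.contains forbidden p = pvBad ordermap pre p) →
      pvA_loop ordermap rest (pre.length : Int) forbidden
        = ((PySem.List.enumerate rest (pre.length : Int)).find?
            (pvP ordermap (pre ++ rest))).map (·.1)
  | [], pre, forbidden, _ => by simp [pvA_loop, PySem.List.enumerate]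
  | page :: rest, pre, forbidden, hinv => by
    have htake : PySem.List.slice (pre ++ page :: rest) none (some (pre.length : Int)) = pre := by
      rw [PySem.List.slice_to_natCast]
      exact List.take_left
    have hP : pvP ordermap (pre ++ page :: rest) ((pre.length : Int), page)
        = PySem.Set.contains forbidden page := by
      show (PySem.List.slice (pre ++ page :: rest) none (some (pre.length : Int))).any
          (fun prev => (PySem.Dict.getD ⟨ordermap⟩ prev []).contains page) = _
      rw [htake]
      exact (hinv page).symm
    rw [PySem.List.enumerate_cons]
    cases hmem : PySem.Set.contains forbidden page with
    | true =>
      rw [List.find?_cons_of_pos (hP.trans hmem)]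
      simp only [pvA_loop, hmem]
      rfl
    | false =>
      rw [List.find?_cons_of_neg (by rw [hP, hmem]; exact Bool.false_ne_true)]
      have hlen : ((pre ++ [page]).length : Int) = (pre.length : Int) + 1 := by simp
      have hassoc : (pre ++ [page]) ++ rest = pre ++ page :: rest := by simp
      simp only [pvA_loop, hmem, Bool.false_eq_true, if_false]
      cases hc : PySem.Dict.contains ⟨ordermap⟩ page with
      | true =>
        simp only [if_true]
        have := pvA_loop_eq ordermap rest (pre ++ [page])
          (PySem.Set.union forbidden (PySem.Dict.getD ⟨ordermap⟩ page []))
          (fun p => by rw [pv_contains_union, pvBad_append, hinv p])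
        rw [hlen, hassoc] at this
        exact this
      | false =>
        simp only [Bool.false_eq_true, if_false]
        have hget : PySem.Dict.getD ⟨ordermap⟩ page [] = ([] : List Int) :=
          PySem.Dict.getD_of_not_contains ⟨ordermap⟩ [] hc
        have := pvA_loop_eq ordermap rest (pre ++ [page]) forbidden
          (fun p => by rw [pvBad_append, hinv p, hget]; simp)
        rw [hlen, hassoc] at this
        exact this

-- find? only looks at members: pointwise-equal predicates give equal results
theorem pv_find?_congr {α : Type} (p q : α → Bool) :
    ∀ (l : List α), (∀ x ∈ l, p x = q x) → l.find? p = l.find? q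
  | [], _ => rfl
  | x :: l, h => by
    rw [List.find?_cons, List.find?_cons, h x (List.mem_cons_self),
        pv_find?_congr p q l (fun y hy => h y (List.mem_cons_of_mem x hy))]

-- B's inner pass-1 loop: insert-if-absent over a value list
theorem pv_inner_get? (vs : List Int) :
    ∀ (d : PySem.Dict Int Int) (v s : Int),
      (vs.foldl (fun d succ => if d.contains succ then d else d.insert succ v) d).get? s
        = (d.get? s).or (if vs.contains s then some v else none) := by
  induction vs with
  | nil => intro d v s; simp
  | cons w vs ih =>
    intro d v s
    simp only [List.foldl_cons]
    by_cases hsw : s = w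
    · subst hsw
      cases hw : d.contains s with
      | true =>
        rw [if_pos rfl, ih]
        have : (d.get? s).isSome := by rw [← PySem.Dict.contains_eq_isSome_get?, hw]
        obtain ⟨a, ha⟩ := Option.isSome_iff_exists.mp this
        simp [ha]
      | false =>
        rw [if_neg (by simp), ih, PySem.Dict.get?_insert]
        have : d.get? s = none := by
          have := PySem.Dict.contains_eq_isSome_get? d s
          rw [hw] at this
          exact Option.not_isSome_iff_eq_none.mp (by rw [← this]; simp)
        simp [this]
    · have hbeq : (w == s) = false := by simp [Ne.symm hsw]
      cases hw : d.contains w with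
      | true =>
        rw [if_pos rfl, ih]
        simp [hsw]
      | false =>
        rw [if_neg (by simp), ih, PySem.Dict.get?_insert]
        simp [hsw]

-- the pass-1 predicate
def pvSucc (ordermap : List (Int × List Int)) (s q : Int) : Bool :=
  (PySem.Dict.getD ⟨ordermap⟩ q []).contains s

-- characterisation of pass 1: `earliest_ban` holds 1 + the first index whose page forbids s
theorem pv_outer_get? (ordermap : List (Int × List Int)) :
    ∀ (rest pre : List Int) (d : PySem.Dict Int Int),
      (∀ s : Int, d.get? s = ((pre.findIdx? (pvSucc ordermap s)).map (fun j : Nat => ((j : Int) + 1)))) →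
      ∀ s : Int,
        ((PySem.List.enumerate rest (pre.length : Int)).foldl
          (fun d jp =>
            (PySem.Dict.getD ⟨ordermap⟩ jp.2 []).foldl
              (fun d succ => if d.contains succ then d else d.insert succ (jp.1 + 1)) d)
          d).get? s
        = (((pre ++ rest).findIdx? (pvSucc ordermap s)).map (fun j : Nat => ((j : Int) + 1)))
  | [], pre, d, hinv, s => by simpa [PySem.List.enumerate] using hinv s
  | page :: rest, pre, d, hinv, s => by
    rw [PySem.List.enumerate_cons]
    simp only [List.foldl_cons]
    have hlen : ((pre ++ [page]).length : Int) = (pre.length : Int) + 1 := by simp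
    have hassoc : (pre ++ [page]) ++ rest = pre ++ page :: rest := by simp
    have hstep : ∀ s : Int,
        ((PySem.Dict.getD ⟨ordermap⟩ page []).foldl
          (fun d succ => if d.contains succ then d else d.insert succ ((pre.length : Int) + 1)) d).get? s
        = (((pre ++ [page]).findIdx? (pvSucc ordermap s)).map (fun j : Nat => ((j : Int) + 1))) := by
      intro t
      rw [pv_inner_get? _ d _ t, hinv t, List.findIdx?_append]
      cases hfd : pre.findIdx? (pvSucc ordermap t) with
      | some j => simp
      | none =>
        simp only [Option.map_none, Option.or]
        cases hpg : pvSucc ordermap t page with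
        | true =>
          rw [show (PySem.Dict.getD ⟨ordermap⟩ page []).contains t = true from hpg]
          simp [List.findIdx?_cons, hpg]
        | false =>
          rw [show (PySem.Dict.getD ⟨ordermap⟩ page []).contains t = false from hpg]
          simp [List.findIdx?_cons, hpg]
    have := pv_outer_get? ordermap rest (pre ++ [page]) _ hstep s
    rw [hlen, hassoc] at this
    exact this

-- pointwise agreement of the two find? predicates on the enumeration
theorem pv_pred_agree (update_nums : List Int) (ordermap : List (Int × List Int)) :
    ∀ ip ∈ PySem.List.enumerate update_nums 0,
      (decide ((pvEarliestBan update_nums ordermap).getD ip.2 ((update_nums.length : Int) + 1)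
        ≤ ip.1)) = pvP ordermap update_nums ip := by
  intro ip hip
  obtain ⟨k, hk, rfl⟩ := (PySem.List.mem_enumerate_iff _ _ _).mp hip
  have hget : ∀ s : Int, (pvEarliestBan update_nums ordermap).get? s
      = ((update_nums.findIdx? (pvSucc ordermap s)).map (fun j : Nat => ((j : Int) + 1))) := by
    intro s
    have := pv_outer_get? ordermap update_nums [] PySem.Dict.empty (fun s => by simp) s
    simpa using this
  have hfst : ((0 : Int) + (k : Int), update_nums[k]).1 = (k : Int) := by simp
  have hsnd : ((0 : Int) + (k : Int), update_nums[k]).2 = update_nums[k] := rfl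
  rw [hfst, hsnd]
  have hslice : pvP ordermap update_nums ((0 : Int) + (k : Int), update_nums[k])
      = (update_nums.take k).any (fun prev => (PySem.Dict.getD ⟨ordermap⟩ prev []).contains update_nums[k]) := by
    show (PySem.List.slice update_nums none (some ((0 : Int) + (k : Int)))).any _ = _
    rw [show ((0 : Int) + (k : Int)) = ((k : Nat) : Int) by simp, PySem.List.slice_to_natCast]
  rw [hslice]
  rw [PySem.Dict.getD_eq_get?_getD, hget update_nums[k]]
  cases hfd : update_nums.findIdx? (pvSucc ordermap update_nums[k]) with
  | none =>
    have hall := List.findIdx?_eq_none_iff.mp hfd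
    have hanyf : (update_nums.take k).any
        (fun prev => (PySem.Dict.getD ⟨ordermap⟩ prev []).contains update_nums[k]) = false := by
      rw [List.any_eq_false]
      intro x hx
      exact (Bool.not_eq_true _).mpr (hall x (List.mem_of_mem_take hx))
    rw [hanyf]
    simp only [Option.map_none, Option.getD_none]
    rw [decide_eq_false]
    omega
  | some j =>
    obtain ⟨hjlt, hpj, hmin⟩ := List.findIdx?_eq_some_iff_getElem.mp hfd
    simp only [Option.map_some, Option.getD_some]
    by_cases hjk : j < k
    · have hanyt : (update_nums.take k).any
          (fun prev => (PySem.Dict.getD ⟨ordermap⟩ prev []).contains update_nums[k]) = true := by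
        rw [List.any_eq_true]
        refine ⟨update_nums[j], ?_, hpj⟩
        have hjlen : j < (update_nums.take k).length := by
          simp [List.length_take]
          omega
        have : (update_nums.take k)[j] = update_nums[j] := List.getElem_take
        rw [← this]
        exact List.getElem_mem hjlen
      rw [hanyt, decide_eq_true]
      omega
    · have hanyf : (update_nums.take k).any
          (fun prev => (PySem.Dict.getD ⟨ordermap⟩ prev []).contains update_nums[k]) = false := by
        rw [List.any_eq_false]
        intro x hx
        obtain ⟨i, hilen, hix⟩ := List.mem_iff_getElem.mp hx
        have hik : i < k := by
          have hlt : (update_nums.take k).length ≤ k := by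
            simp [List.length_take]
          omega
        have : (update_nums.take k)[i] = update_nums[i] := List.getElem_take
        rw [← hix, this]
        exact hmin i (by omega)
      rw [hanyf, decide_eq_false]
      omega

-- ===== VERDICT (by name: the statement is the Claim_ definition above) =====
theorem find_invalid_index_spec : Claim_equal_find_invalid_index := by
  intro update_nums ordermap _
  unfold Spec_find_invalid_index find_invalid_index find_invalid_index_alt
  have hA := pvA_loop_eq ordermap update_nums [] PySem.Set.empty (fun p => rfl)
  have hcongr := pv_find?_congr
    (fun ip => decide ((pvEarliestBan update_nums ordermap).getD ip.2
      ((update_nums.length : Int) + 1) ≤ ip.1))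
    (pvP ordermap update_nums)
    (PySem.List.enumerate update_nums 0)
    (pv_pred_agree update_nums ordermap)
  simp only [List.length_nil, Nat.cast_zero, List.nil_append] at hA
  rw [hA, ← hcongr]
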